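-- pv_equiv track=rewrite | github.com/SebastianLazarte/N-Puzzle-Solver | main.py | GoalBoard
-- ===== SOURCE A (Python) =====
-- def GoalBoard(size):
--     goalBoard = []
--     array = [i for i in range(1, size * size)]
--     array.append(0)
--     for i in range(size):
--         aux = []
--         for j in range(size):
--             aux.append(array[i * size + j])
--         goalBoard.append(aux)
--     return goalBoard
-- ===== SOURCE B (Python) =====
-- def GoalBoard(size):
--     # Each cell computed directly: (p+1) % size**2 yields 1..size*size-1 then 0.
--     return [[(i * size + j + 1) % (size * size) for j in range(size)]
--             for i in range(size)]
-- ===== Notes on version B (the rewrite author's own statement) =====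
-- stated objective: simpler
-- what changed: B drops A's intermediate flat array (range list plus appended 0 sentinel, then indexed reshape) and computes each cell in place by modular arithmetic (i*size+j+1) % size**2.
import Mathlib
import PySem

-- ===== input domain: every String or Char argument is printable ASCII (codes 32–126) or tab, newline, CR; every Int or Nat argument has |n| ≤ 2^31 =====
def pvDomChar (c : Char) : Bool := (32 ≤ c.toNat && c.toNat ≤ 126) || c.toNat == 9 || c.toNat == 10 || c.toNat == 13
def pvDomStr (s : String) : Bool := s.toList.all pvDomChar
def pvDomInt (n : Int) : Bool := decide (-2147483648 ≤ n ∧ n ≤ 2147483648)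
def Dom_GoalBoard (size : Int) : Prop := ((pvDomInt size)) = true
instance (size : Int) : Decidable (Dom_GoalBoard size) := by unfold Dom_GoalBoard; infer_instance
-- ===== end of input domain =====

-- B computes each cell directly by modular arithmetic instead of building and reshaping a flat array (simpler decomposition).

-- ===== PORT A =====
-- Python's list is O(1)-indexed with amortized O(1) append, so A's internal list is ported as a
-- Lean Array (same elements, same order, push = append); the result crosses back to List at the end.
-- pyArrGetD is Python xs[i] for the nonnegative in-range indices that occur here (every index used
-- is 0 ≤ i*size+j < size*size = array.size whenever the loops run, so no IndexError / wraparound arises).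
def pyArrGetD {α : Type} (xs : Array α) (i : Int) (d : α) : α :=
  if h : 0 ≤ i ∧ i.toNat < xs.size then xs[i.toNat] else d

def GoalBoard (size : Int) : List (List Int) :=
  let array : Array Int := (PySem.List.pyRange 1 (size * size) 1).toArray.push 0
  let goalBoard : Array (Array Int) :=
    (PySem.List.pyRange 0 size 1).foldl (fun goalBoard i =>
      goalBoard.push ((PySem.List.pyRange 0 size 1).foldl (fun aux j =>
        aux.push (pyArrGetD array (i * size + j) 0)) #[])) #[]
  goalBoard.toList.map Array.toList

-- ===== PORT B =====
def GoalBoard_alt (size : Int) : List (List Int) :=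
  (PySem.List.pyRange 0 size 1).map (fun i =>
    (PySem.List.pyRange 0 size 1).map (fun j =>
      PySem.Int.mod (i * size + j + 1) (size * size)))

-- ===== PRECONDITION & SPEC =====
def Spec_GoalBoard (size : Int) (out : List (List Int)) : Prop := out = GoalBoard_alt size
instance (size : Int) (out : List (List Int)) : Decidable (Spec_GoalBoard size out) := by unfold Spec_GoalBoard; infer_instance

-- ===== CLAIM (what is proved, stated in full; the proofs are below) =====
def Claim_equal_GoalBoard : Prop := ∀ (size : Int), Dom_GoalBoard size → Spec_GoalBoard size (GoalBoard size)

-- ===== LEMMAS AND PROOFS =====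

-- 'out.append(x)' loop over a list, with an Array accumulator, seen as a map.
lemma foldl_push_toList {α β : Type} (l : List α) (f : α → β) (acc : Array β) :
    (l.foldl (fun a x => a.push (f x)) acc).toList = acc.toList ++ l.map f := by
  induction l generalizing acc with
  | nil => simp
  | cons x xs ih => rw [List.foldl_cons, ih]; simp

-- The flat array A builds, indexed at p (0 ≤ p < size²), equals B's modular formula.
lemma goalboard_cell (n p : Int) (hn : 0 < n) (hp : 0 ≤ p) (hlt : p < n) :
    pyArrGetD ((PySem.List.pyRange 1 n 1).toArray.push 0) p 0 = PySem.Int.mod (p + 1) n := by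
  have hsz : ((PySem.List.pyRange 1 n 1).toArray.push 0).size = n.toNat := by
    simp [PySem.List.length_pyRange_one]; omega
  have hin : 0 ≤ p ∧ p.toNat < ((PySem.List.pyRange 1 n 1).toArray.push 0).size := by
    constructor
    · exact hp
    · omega
  rw [pyArrGetD, dif_pos hin]
  rw [← Array.getElem_toList]
  have htl : ((PySem.List.pyRange 1 n 1).toArray.push 0).toList
      = PySem.List.pyRange 1 n 1 ++ [0] := by simp
  rw [PySem.Int.mod_eq_emod_of_pos hn]
  have hplen : ((PySem.List.pyRange 1 n 1).length : Int) = n - 1 := by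
    simp [PySem.List.length_pyRange_one]; omega
  by_cases h : p < n - 1
  · have hpn : p.toNat < (PySem.List.pyRange 1 n 1).length := by omega
    simp only [htl]
    rw [List.getElem_append_left hpn, PySem.List.getElem_pyRange_one]
    have : (1 : Int) + p.toNat = p + 1 := by omega
    rw [this, Int.emod_eq_of_lt (by omega) (by omega)]
  · have hpe : p = n - 1 := by omega
    have hge : (PySem.List.pyRange 1 n 1).length ≤ p.toNat := by omega
    simp only [htl]
    rw [List.getElem_append_right hge]
    simp [hpe]

-- ===== VERDICT (by name: the statement is the Claim_ definition above) =====
theorem GoalBoard_spec : Claim_equal_GoalBoard := by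
  intro size _
  show GoalBoard size = GoalBoard_alt size
  unfold GoalBoard GoalBoard_alt
  simp only [foldl_push_toList, List.nil_append, List.map_map]
  apply List.map_congr_left
  intro i hi
  simp only [Function.comp_apply, foldl_push_toList, List.nil_append]
  apply List.map_congr_left
  intro j hj
  rw [PySem.List.mem_pyRange_one] at hi hj
  exact goalboard_cell (size * size) (i * size + j) (by nlinarith) (by nlinarith) (by nlinarith)
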